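-- pv_equiv track=rewrite | github.com/pypi-data/pypi-mirror-360 | packages/imas-mcp/imas_mcp-1.4.0.tar.gz/imas_mcp-1.4.0/imas_mcp/core/xml_parser.py | _extract_semantic_groups
-- ===== SOURCE A (Python) =====
-- from typing import Any, Dict, List, Optional, Set
--
-- def _extract_semantic_groups(
--     paths: Dict[str, Dict[str, Any]]
-- ) -> Dict[str, List[str]]:
--     """Group paths by semantic similarity."""
--     semantic_groups = {}
--
--     # Group by common prefixes and physics concepts
--     for path, metadata in paths.items():
--         # Extract common patterns
--         path_parts = path.split("/")
--         if len(path_parts) >= 3: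
--             group_key = "/".join(path_parts[:3])  # First 3 levels
--             if group_key not in semantic_groups:
--                 semantic_groups[group_key] = []
--             semantic_groups[group_key].append(path)
--
--     # Filter out single-item groups
--     semantic_groups = {k: v for k, v in semantic_groups.items() if len(v) > 1}
--
--     return semantic_groups
-- ===== SOURCE B (Python) =====
-- def _extract_semantic_groups(paths):
--     """Group paths by semantic similarity."""
--     def key(p):
--         parts = p.split("/")
--         return "/".join(parts[:3]) if len(parts) >= 3 else None
--
--     ps = list(paths)
--     groups = {}
--     for i, p in enumerate(ps):
--         g = key(p)
--         if g is None or any(key(q) == g for q in ps[:i]):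
--             continue  # not a qualifying path, or its group was already emitted
--         members = [q for q in ps if key(q) == g]
--         if len(members) > 1:
--             groups[g] = members
--     return groups
-- ===== Notes on version B (the rewrite author's own statement) =====
-- stated objective: alternative
-- what changed: A accumulates per-key lists in a dict in one pass and then filters out singleton groups; B keeps no accumulator at all: at each path whose 3-level prefix has not occurred before it gathers the whole group by a direct scan of the path list and emits it only if it has more than one member (nested-scan first-occurrence grouping instead of dict accumulation).
import Mathlib
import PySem

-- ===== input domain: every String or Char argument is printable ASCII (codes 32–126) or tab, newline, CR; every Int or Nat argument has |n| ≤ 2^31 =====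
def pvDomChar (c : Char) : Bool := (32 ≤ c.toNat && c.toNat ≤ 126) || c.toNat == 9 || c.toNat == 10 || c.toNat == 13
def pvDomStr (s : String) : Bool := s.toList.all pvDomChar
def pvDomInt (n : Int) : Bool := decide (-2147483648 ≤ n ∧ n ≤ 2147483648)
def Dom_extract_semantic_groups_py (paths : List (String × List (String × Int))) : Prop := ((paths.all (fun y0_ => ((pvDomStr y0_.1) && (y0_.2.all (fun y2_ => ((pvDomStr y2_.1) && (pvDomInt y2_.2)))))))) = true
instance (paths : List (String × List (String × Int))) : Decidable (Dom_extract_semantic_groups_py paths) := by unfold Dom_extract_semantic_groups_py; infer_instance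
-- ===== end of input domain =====

-- B drops A's dict accumulation entirely: at each path whose 3-level prefix occurs for the first
-- time, B gathers the whole group by a direct scan of the path list and emits it only if it has
-- more than one member (nested-scan grouping; objective: alternative — same values, not faster).
-- The dict argument is the association list of a Python dict; both ports iterate its keys in
-- Python dict order (first occurrence of each key).

-- ===== PORT A =====
def extract_semantic_groups_py (paths : List (String × List (String × Int))) : List (String × List String) :=
  let semantic_groups : PySem.Dict String (List String) :=
    (PySem.List.dedup (paths.map Prod.fst)).foldl (fun d path =>
      let path_parts := PySem.Chars.splitOn path.toList ['/']
      if 3 ≤ path_parts.length then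
        let group_key := String.ofList (PySem.Chars.join ['/'] (PySem.List.slice path_parts none (some 3)))
        let d1 := if d.contains group_key then d else d.insert group_key ([] : List String)
        d1.insert group_key (d1.getD group_key [] ++ [path])
      else d) PySem.Dict.empty
  semantic_groups.items.filter (fun kv => 1 < kv.2.length)

-- ===== PORT B =====
-- B's helper key(p): the 3-level prefix, or None for a path of fewer than 3 parts
def pvKeyB (p : String) : Option String :=
  let parts := PySem.Chars.splitOn p.toList ['/']
  if 3 ≤ parts.length then some (String.ofList (PySem.Chars.join ['/'] (PySem.List.slice parts none (some 3)))) else none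

def extract_semantic_groups_py_alt (paths : List (String × List (String × Int))) : List (String × List String) :=
  let ps := PySem.List.dedup (paths.map Prod.fst)
  (PySem.List.enumerate ps).foldl (fun groups ip =>
    match pvKeyB ip.2 with
    | none => groups
    | some g =>
      if (PySem.List.slice ps none (some ip.1)).any (fun q => pvKeyB q == some g) then groups
      else
        let members := ps.filter (fun q => pvKeyB q == some g)
        if 1 < members.length then groups ++ [(g, members)] else groups) []

-- ===== PRECONDITION & SPEC =====
def Spec_extract_semantic_groups_py (paths : List (String × List (String × Int))) (out : List (String × List String)) : Prop := out = extract_semantic_groups_py_alt paths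
instance (paths : List (String × List (String × Int))) (out : List (String × List String)) : Decidable (Spec_extract_semantic_groups_py paths out) := by unfold Spec_extract_semantic_groups_py; infer_instance

-- ===== CLAIM (what is proved, stated in full; the proofs are below) =====
def Claim_equal_extract_semantic_groups_py : Prop := ∀ (paths : List (String × List (String × Int))), Dom_extract_semantic_groups_py paths → Spec_extract_semantic_groups_py paths (extract_semantic_groups_py paths)

-- ===== LEMMAS AND PROOFS =====

-- the qualification test (≥ 3 levels) and the 3-level group key, shared by both programs
def pvQ (p : String) : Bool := 3 ≤ (PySem.Chars.splitOn p.toList ['/']).length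
def pvG (p : String) : String := String.ofList (PySem.Chars.join ['/'] (PySem.List.slice (PySem.Chars.splitOn p.toList ['/']) none (some 3)))

theorem pv_keyB_eq (p : String) : pvKeyB p = if pvQ p then some (pvG p) else none := by
  by_cases h : 3 ≤ (PySem.Chars.splitOn p.toList ['/']).length <;> simp [pvKeyB, pvQ, pvG, h]

theorem pv_keyB_beq (p g : String) : (pvKeyB p == some g) = (pvQ p && (pvG p == g)) := by
  by_cases h : pvQ p <;> simp [pv_keyB_eq, h]

-- A's loop body, named
def pvAStep (d : PySem.Dict String (List String)) (path : String) : PySem.Dict String (List String) :=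
  if pvQ path then
    let d1 := if d.contains (pvG path) then d else d.insert (pvG path) ([] : List String)
    d1.insert (pvG path) (d1.getD (pvG path) [] ++ [path])
  else d

theorem pv_stepA_eq : (fun (d : PySem.Dict String (List String)) path =>
    let path_parts := PySem.Chars.splitOn path.toList ['/']
    if 3 ≤ path_parts.length then
      let group_key := String.ofList (PySem.Chars.join ['/'] (PySem.List.slice path_parts none (some 3)))
      let d1 := if d.contains group_key then d else d.insert group_key ([] : List String)
      d1.insert group_key (d1.getD group_key [] ++ [path])
    else d) = pvAStep := by
  funext d path
  by_cases h : 3 ≤ (PySem.Chars.splitOn path.toList ['/']).length <;>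
    simp [pvAStep, pvQ, pvG, h]

theorem pv_keys_eq (d : PySem.Dict String (List String)) : d.keys = d.items.map Prod.fst := rfl

theorem pv_dedup_append {α : Type} [BEq α] (xs : List α) (a : α) :
    PySem.List.dedup (xs ++ [a]) = PySem.Set.add (PySem.List.dedup xs) a := by
  simp [PySem.List.dedup, PySem.Set.ofList, List.foldl_append]

theorem pv_set_contains_dedup_true {α : Type} [BEq α] [LawfulBEq α] {xs : List α} {x : α}
    (h : x ∈ xs) : PySem.Set.contains (PySem.List.dedup xs) x = true := by
  rw [PySem.Set.contains_iff, PySem.List.mem_dedup]; exact h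

theorem pv_set_contains_dedup_false {α : Type} [BEq α] [LawfulBEq α] {xs : List α} {x : α}
    (h : x ∉ xs) : PySem.Set.contains (PySem.List.dedup xs) x = false := by
  rw [Bool.eq_false_iff]
  intro hc
  rw [PySem.Set.contains_iff, PySem.List.mem_dedup] at hc
  exact h hc

-- A's accumulation loop characterised: the dict holds, per group key (in first-occurrence
-- order), all qualifying paths of that group in order.
set_option maxHeartbeats 1000000 in
theorem pv_A_fold (l : List String) :
    ((l.foldl pvAStep (PySem.Dict.empty : PySem.Dict String (List String))).items)
    = (PySem.List.dedup ((l.filter pvQ).map pvG)).map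
        (fun c => (c, l.filter (fun p => pvQ p && (pvG p == c)))) := by
  induction l using List.reverseRecOn with
  | nil => rfl
  | append_singleton l a ih =>
    rw [List.foldl_append, List.foldl_cons, List.foldl_nil]
    have hkeys : (l.foldl pvAStep PySem.Dict.empty).keys
        = PySem.List.dedup ((l.filter pvQ).map pvG) := by
      rw [pv_keys_eq, ih, List.map_map]
      exact List.map_id' _
    have hnodup : (l.foldl pvAStep PySem.Dict.empty).keys.Nodup := by
      rw [hkeys]; exact PySem.List.nodup_dedup _
    by_cases hq : pvQ a
    · have hfa : List.filter pvQ [a] = [a] := by simp [hq]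
      by_cases hmem : pvG a ∈ (l.filter pvQ).map pvG
      · have hc : (l.foldl pvAStep PySem.Dict.empty).contains (pvG a) = true := by
          rw [PySem.Dict.contains_eq_decide_mem_keys, hkeys]
          simp [hmem]
        have hvm : (pvG a, l.filter (fun p => pvQ p && (pvG p == pvG a)))
            ∈ (l.foldl pvAStep PySem.Dict.empty).items := by
          rw [ih]
          exact List.mem_map_of_mem ((PySem.List.mem_dedup _ _).mpr hmem)
        have hval := PySem.Dict.getD_of_mem_items _ hvm hnodup []
        have hstep : pvAStep (l.foldl pvAStep PySem.Dict.empty) a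
            = (l.foldl pvAStep PySem.Dict.empty).insert (pvG a)
                ((l.foldl pvAStep PySem.Dict.empty).getD (pvG a) [] ++ [a]) := by
          simp [pvAStep, hq, hc]
        have hca : PySem.Set.contains (PySem.List.dedup ((l.filter pvQ).map pvG)) (pvG a) = true :=
          pv_set_contains_dedup_true hmem
        have hgrp : PySem.List.dedup (((l ++ [a]).filter pvQ).map pvG)
            = PySem.List.dedup ((l.filter pvQ).map pvG) := by
          rw [List.filter_append, hfa, List.map_append, List.map_cons, List.map_nil,
            pv_dedup_append]
          simp only [PySem.Set.add]
          rw [if_pos hca]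
        rw [hstep, PySem.Dict.items_insert_of_contains _ _ hc, ih, hval, hgrp, List.map_map]
        apply List.map_congr_left
        intro c hcmem
        by_cases hceq : c = pvG a
        · subst hceq
          simp [Function.comp, List.filter_append, hq]
        · have hne : (c == pvG a) = false := by simp [hceq]
          have hne' : (pvG a == c) = false := by
            simp only [beq_eq_false_iff_ne, ne_eq]
            exact fun h => hceq h.symm
          simp [Function.comp, hne, hne', List.filter_append, hq]
      · have hc : (l.foldl pvAStep PySem.Dict.empty).contains (pvG a) = false := by
          rw [PySem.Dict.contains_eq_decide_mem_keys, hkeys]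
          simp [hmem]
        have hstep : pvAStep (l.foldl pvAStep PySem.Dict.empty) a
            = ((l.foldl pvAStep PySem.Dict.empty).insert (pvG a) []).insert (pvG a)
                (((l.foldl pvAStep PySem.Dict.empty).insert (pvG a) []).getD (pvG a) [] ++ [a]) := by
          simp [pvAStep, hq, hc]
        have hc1 : ((l.foldl pvAStep PySem.Dict.empty).insert (pvG a) ([] : List String)).contains (pvG a) = true :=
          PySem.Dict.contains_insert_self _ _ _
        have hca : PySem.Set.contains (PySem.List.dedup ((l.filter pvQ).map pvG)) (pvG a) = false :=
          pv_set_contains_dedup_false hmem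
        have hnil : l.filter (fun p => pvQ p && (pvG p == pvG a)) = [] := by
          rw [List.filter_eq_nil_iff]
          intro p hp hb
          simp only [Bool.and_eq_true, beq_iff_eq] at hb
          have hx : pvG p ∈ (l.filter pvQ).map pvG :=
            List.mem_map_of_mem (List.mem_filter.mpr ⟨hp, hb.1⟩)
          rw [hb.2] at hx
          exact hmem hx
        have hgrp : PySem.List.dedup (((l ++ [a]).filter pvQ).map pvG)
            = PySem.List.dedup ((l.filter pvQ).map pvG) ++ [pvG a] := by
          rw [List.filter_append, hfa, List.map_append, List.map_cons, List.map_nil,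
            pv_dedup_append]
          simp only [PySem.Set.add]
          rw [if_neg (by rw [hca]; exact Bool.false_ne_true)]
        rw [hstep, PySem.Dict.getD_insert_self, PySem.Dict.items_insert_of_contains _ _ hc1,
          PySem.Dict.items_insert_of_not_contains _ _ hc, ih, hgrp]
        simp only [List.map_append, List.map_map, List.map_cons, List.map_nil]
        refine congrArg₂ (· ++ ·) ?_ ?_
        · apply List.map_congr_left
          intro c hcmem
          have hcl : c ∈ (l.filter pvQ).map pvG := (PySem.List.mem_dedup _ _).mp hcmem
          have hne : (c == pvG a) = false := by
            simp only [beq_eq_false_iff_ne, ne_eq]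
            intro h; exact hmem (h ▸ hcl)
          have hne' : (pvG a == c) = false := by
            simp only [beq_eq_false_iff_ne, ne_eq]
            intro h; exact hmem (h ▸ hcl)
          simp [Function.comp, hne, hne', List.filter_append, hq]
        · simp [List.filter_append, hq, hnil]
    · have hstep : pvAStep (l.foldl pvAStep PySem.Dict.empty) a = l.foldl pvAStep PySem.Dict.empty := by
        simp [pvAStep, hq]
      have hfa : List.filter pvQ [a] = [] := by simp [hq]
      rw [hstep, ih, List.filter_append, hfa, List.append_nil]
      apply List.map_congr_left
      intro c _
      simp [List.filter_append, hq]

-- B's per-index contribution: emit h g at the first occurrence of a group key g, nothing otherwise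
def pvE (ps : List String) (h : String → List (String × List String)) (ip : Int × String) :
    List (String × List String) :=
  match pvKeyB ip.2 with
  | none => []
  | some g =>
    if (PySem.List.slice ps none (some ip.1)).any (fun q => pvKeyB q == some g) then []
    else h g

-- flatMap of a guarded singleton is filter-then-map
theorem pv_flatMap_ite {α β : Type} (xs : List α) (p : α → Bool) (f : α → β) :
    xs.flatMap (fun c => if p c then [f c] else []) = (xs.filter p).map f := by
  induction xs with
  | nil => rfl
  | cons a xs ih => by_cases h : p a <;> simp [List.flatMap_cons, h, ih]

-- the guard is membership of the key among the earlier qualifying keys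
theorem pv_any_eq (l : List String) (g : String) :
    (l.any (fun q => pvKeyB q == some g)) = decide (g ∈ (l.filter pvQ).map pvG) := by
  rw [show (fun q => pvKeyB q == some g) = fun q => pvQ q && (pvG q == g) from
    funext (fun q => pv_keyB_beq q g)]
  induction l with
  | nil => rfl
  | cons a l ih =>
    by_cases hq : pvQ a
    · by_cases hg : pvG a = g
      · simp [hq, hg]
      · have hb : (pvG a == g) = false := by simp [hg]
        have hg' : ¬ g = pvG a := fun h => hg h.symm
        simp [hq, hb, hg', ih]
    · simp [hq, ih]

-- enumerate-with-first-occurrence-guard visits exactly the deduped qualifying keys, in order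
theorem pv_enum_firstocc (h : String → List (String × List String)) (ps : List String) :
    (PySem.List.enumerate ps).flatMap (pvE ps h)
    = (PySem.List.dedup ((ps.filter pvQ).map pvG)).flatMap h := by
  induction ps using List.reverseRecOn with
  | nil => rfl
  | append_singleton ps a ih =>
    rw [PySem.List.enumerate_append, List.flatMap_append]
    have hstable : (PySem.List.enumerate ps).flatMap (pvE (ps ++ [a]) h)
        = (PySem.List.enumerate ps).flatMap (pvE ps h) := by
      apply List.flatMap_congr
      intro ip hip
      obtain ⟨k, hk, hipe⟩ := (PySem.List.mem_enumerate_iff _ _ _).mp hip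
      subst hipe
      simp only [pvE, zero_add]
      rw [PySem.List.slice_to_natCast, PySem.List.slice_to_natCast,
        List.take_append_of_le_length (Nat.le_of_lt hk)]
    rw [hstable, ih]
    have hlast : PySem.List.enumerate [a] (0 + (ps.length : Int)) = [((ps.length : Int), a)] := by
      simp [PySem.List.enumerate]
    rw [hlast, List.flatMap_cons, List.flatMap_nil, List.append_nil]
    have hslice : PySem.List.slice (ps ++ [a]) none (some ((ps.length : Int))) = ps := by
      rw [PySem.List.slice_to_natCast]
      simp
    by_cases hq : pvQ a
    · have hkey : pvKeyB a = some (pvG a) := by simp [pv_keyB_eq, hq]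
      have hfa : (ps ++ [a]).filter pvQ = ps.filter pvQ ++ [a] := by
        simp [List.filter_append, hq]
      rw [hfa, List.map_append, List.map_cons, List.map_nil, pv_dedup_append]
      simp only [PySem.Set.add]
      by_cases hmem : pvG a ∈ (ps.filter pvQ).map pvG
      · have hguard : (ps.any (fun q => pvKeyB q == some (pvG a))) = true := by
          rw [pv_any_eq]; simp [hmem]
        rw [if_pos (pv_set_contains_dedup_true hmem)]
        simp [pvE, hkey, hslice, hguard]
      · have hguard : (ps.any (fun q => pvKeyB q == some (pvG a))) = false := by
          rw [pv_any_eq]; simp [hmem]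
        rw [if_neg (by rw [pv_set_contains_dedup_false hmem]; exact Bool.false_ne_true)]
        simp [pvE, hkey, hslice, hguard, List.flatMap_append]
    · have hkey : pvKeyB a = none := by simp [pv_keyB_eq, hq]
      have hfa : (ps ++ [a]).filter pvQ = ps.filter pvQ := by
        simp [List.filter_append, hq]
      rw [hfa]
      simp [pvE, hkey]

-- B's loop body rewritten as an append of the per-index contribution
theorem pv_stepB_eq (ps : List String) :
    (fun (groups : List (String × List String)) (ip : Int × String) =>
      match pvKeyB ip.2 with
      | none => groups
      | some g =>
        if (PySem.List.slice ps none (some ip.1)).any (fun q => pvKeyB q == some g) then groups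
        else
          let members := ps.filter (fun q => pvKeyB q == some g)
          if 1 < members.length then groups ++ [(g, members)] else groups)
    = (fun groups ip => groups ++ pvE ps
        (fun g =>
          let members := ps.filter (fun q => pvKeyB q == some g)
          if 1 < members.length then [(g, members)] else []) ip) := by
  funext groups ip
  simp only [pvE]
  cases pvKeyB ip.2 with
  | none => simp
  | some g =>
    dsimp only
    split_ifs <;> simp

-- ===== VERDICT (by name: the statement is the Claim_ definition above) =====
theorem extract_semantic_groups_py_spec : Claim_equal_extract_semantic_groups_py := by
  intro paths _
  show extract_semantic_groups_py paths = extract_semantic_groups_py_alt paths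
  simp only [extract_semantic_groups_py, extract_semantic_groups_py_alt]
  rw [pv_stepA_eq, pv_A_fold,
    pv_stepB_eq (PySem.List.dedup (paths.map Prod.fst)),
    PySem.List.foldl_append_eq_flatMap, List.nil_append, pv_enum_firstocc]
  set ps := PySem.List.dedup (paths.map Prod.fst) with hps
  have hmemb : ∀ g : String, ps.filter (fun q => pvKeyB q == some g)
      = ps.filter (fun p => pvQ p && (pvG p == g)) := by
    intro g
    exact List.filter_congr (fun q _ => pv_keyB_beq q g)
  rw [List.filter_map]
  rw [show ((PySem.List.dedup ((ps.filter pvQ).map pvG)).flatMap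
      (fun g =>
        let members := ps.filter (fun q => pvKeyB q == some g)
        if 1 < members.length then [(g, members)] else []))
    = ((PySem.List.dedup ((ps.filter pvQ).map pvG)).flatMap
      (fun g => if (fun c => decide (1 < (ps.filter (fun p => pvQ p && (pvG p == c))).length)) g
        then [(fun c => (c, ps.filter (fun p => pvQ p && (pvG p == c)))) g] else [])) from ?_]
  · rw [pv_flatMap_ite]
    rfl
  · apply List.flatMap_congr
    intro g _
    simp only [hmemb g]
    split_ifs with h1 h2 h2 <;> first | rfl | (exact absurd h1 (by simpa using h2))
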